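-- pv_equiv track=rewrite | github.com/bsdharshini/Recursion3 | h_check_ab.py | check
-- ===== SOURCE A (Python) =====
-- def check(s):
--     l =len(s)
--     if l == 0:
--        return True
--     if s[0] == 'a':
--         if l>1 and s[1:3]=='bb':
--             return check(s[3:])
--         else:
--             return check(s[1:])
--     else:
--         return False
-- ===== SOURCE B (Python) =====
-- def check(s):
--     # DFA for (a|abb)*: 0 = block boundary (accepting), 1 = after 'a' (accepting),
--     # 2 = after 'ab' (need one more 'b'), 3 = dead.
--     st = 0
--     for ch in s:
--         if st == 0:
--             st = 1 if ch == 'a' else 3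
--         elif st == 1:
--             st = 1 if ch == 'a' else (2 if ch == 'b' else 3)
--         elif st == 2:
--             st = 0 if ch == 'b' else 3
--         else:
--             st = 3
--     return st == 0 or st == 1
-- ===== Notes on version B (the rewrite author's own statement) =====
-- stated objective: alternative
-- what changed: Replaced A's recursion with repeated slicing (greedy prefix matching of 'abb'/'a') by a single left-to-right DFA scan over the characters with a 4-state automaton for the language (a|abb)*.
import Mathlib
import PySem

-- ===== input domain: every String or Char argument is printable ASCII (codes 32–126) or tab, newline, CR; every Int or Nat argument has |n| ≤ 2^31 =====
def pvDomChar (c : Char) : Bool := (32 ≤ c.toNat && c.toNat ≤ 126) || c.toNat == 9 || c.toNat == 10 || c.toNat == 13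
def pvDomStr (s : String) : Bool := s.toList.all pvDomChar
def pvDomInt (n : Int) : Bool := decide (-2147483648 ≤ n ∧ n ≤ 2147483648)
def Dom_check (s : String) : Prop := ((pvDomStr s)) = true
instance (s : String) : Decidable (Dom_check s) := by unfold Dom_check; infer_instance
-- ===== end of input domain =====

-- B replaces A's greedy recursion on string slices by a single DFA scan for (a|abb)*; alternative decomposition.

-- ===== PORT A =====
-- A recurses on string slices; ported over the character list (s[1:3] = take 2 of drop 1,
-- s[3:] = drop 3, s[1:] = drop 1 — exact for these nonnegative slice bounds).
def checkAux (cs : List Char) : Bool :=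
  match cs with
  | [] => true                                  -- l == 0: return True
  | c :: rest =>
    if c = 'a' then                             -- s[0] == 'a'
      if (c :: rest).length > 1 ∧ ((c :: rest).drop 1).take 2 = ['b', 'b'] then
        checkAux ((c :: rest).drop 3)           -- check(s[3:])
      else
        checkAux ((c :: rest).drop 1)           -- check(s[1:])
    else false
termination_by cs.length
decreasing_by all_goals (simp; try omega)

def check (s : String) : Bool := checkAux s.toList

-- ===== PORT B =====
-- DFA transition: 0 = block boundary (accepting), 1 = after 'a' (accepting), 2 = after 'ab', 3 = dead.
def pvStep (st : Nat) (ch : Char) : Nat :=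
  if st = 0 then (if ch = 'a' then 1 else 3)
  else if st = 1 then (if ch = 'a' then 1 else if ch = 'b' then 2 else 3)
  else if st = 2 then (if ch = 'b' then 0 else 3)
  else 3

def check_alt (s : String) : Bool :=
  let st := s.toList.foldl pvStep 0
  st == 0 || st == 1

-- ===== PRECONDITION & SPEC =====
def Spec_check (s : String) (out : Bool) : Prop := out = check_alt s
instance (s : String) (out : Bool) : Decidable (Spec_check s out) := by unfold Spec_check; infer_instance

-- ===== CLAIM (what is proved, stated in full; the proofs are below) =====
def Claim_equal_check : Prop := ∀ (s : String), Dom_check s → Spec_check s (check s)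

-- ===== LEMMAS AND PROOFS =====

theorem pvStep_dead (cs : List Char) : cs.foldl pvStep 3 = 3 := by
  induction cs with
  | nil => rfl
  | cons c t ih => simpa [pvStep] using ih

theorem pv_main (cs : List Char) :
    ((cs.foldl pvStep 0 == 0) || (cs.foldl pvStep 0 == 1)) = checkAux cs := by
  match cs with
  | [] => simp [checkAux]
  | c :: rest =>
    by_cases hc : c = 'a'
    · subst hc
      match rest with
      | [] => simp [checkAux, pvStep]
      | d :: rest2 =>
        by_cases hd : d = 'b'
        · subst hd
          match rest2 with
          | [] => simp [checkAux, pvStep]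
          | e :: rest3 =>
            by_cases he : e = 'b'
            · subst he
              have ih := pv_main rest3
              simpa [checkAux, pvStep, List.foldl] using ih
            · -- 'a','b',e with e ≠ 'b': DFA dies; A recurses into a string starting with 'b' → false
              simp [checkAux, pvStep, List.foldl, he, pvStep_dead]
        · by_cases hda : d = 'a'
          · subst hda
            have ih := pv_main ('a' :: rest2)
            simpa [checkAux, pvStep, List.foldl] using ih
          · simp [checkAux, pvStep, List.foldl, hd, hda, pvStep_dead]
    · simp [checkAux, pvStep, List.foldl, hc, pvStep_dead]
termination_by cs.length
decreasing_by all_goals (simp; try omega)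

-- ===== VERDICT (by name: the statement is the Claim_ definition above) =====
theorem check_spec : Claim_equal_check := by
  intro s _
  unfold Spec_check check check_alt
  exact (pv_main s.toList).symm
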